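-- pv_equiv track=rewrite | github.com/jessicabrinegar/cs50x | wk6-python/credit.py | sum_every_other_digit
-- ===== SOURCE A (Python) =====
-- def multiply_and_sum(creditNum):
--     sumOfDigits = 0
--     digitMultiplied = int(2 * (creditNum % 10))
--     while (digitMultiplied != 0):
--         sumOfDigits += digitMultiplied % 10
--         digitMultiplied = int(digitMultiplied / 10)
--     return sumOfDigits
--
-- def sum_every_other_digit(creditNum):
--     # Describes if the current digit should be used, or if it should be skipped
--     useCurrentDigit = False
--     # Keep track of the summation
--     sum = 0
--     while creditNum > 0:
--         # If useCurrentDigit is true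
--         if useCurrentDigit:
--             # Add the digit (or sum of digits) to the sum
--             sum += multiply_and_sum(creditNum)
--         # Switch the bool value of the useCurrentDigit variable
--         useCurrentDigit = not useCurrentDigit
--         # Divide creditNum by 10 (removing the last digit)
--         creditNum = int(creditNum / 10)
--     return sum
-- ===== SOURCE B (Python) =====
-- def sum_every_other_digit(creditNum):
--     # Pass 1: peel the digits, least-significant first.
--     digits = []
--     while creditNum > 0:
--         digits.append(creditNum % 10)
--         creditNum //= 10
--     # Pass 2: add the doubled-digit value for every odd-indexed digit.
--     total = 0
--     for i, d in enumerate(digits):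
--         if i % 2 == 1:
--             dd = 2 * d
--             total += dd if dd < 10 else dd - 9
--     return total
-- ===== Notes on version B (the rewrite author's own statement) =====
-- stated objective: simpler
-- what changed: Replaces A's interleaved toggle-flag loop with an inner digit-sum helper loop by a two-pass pipeline: first extract the digit list, then one enumerate pass adding a closed-form doubled-digit value (2d or 2d-9) at odd indices.
import Mathlib
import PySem

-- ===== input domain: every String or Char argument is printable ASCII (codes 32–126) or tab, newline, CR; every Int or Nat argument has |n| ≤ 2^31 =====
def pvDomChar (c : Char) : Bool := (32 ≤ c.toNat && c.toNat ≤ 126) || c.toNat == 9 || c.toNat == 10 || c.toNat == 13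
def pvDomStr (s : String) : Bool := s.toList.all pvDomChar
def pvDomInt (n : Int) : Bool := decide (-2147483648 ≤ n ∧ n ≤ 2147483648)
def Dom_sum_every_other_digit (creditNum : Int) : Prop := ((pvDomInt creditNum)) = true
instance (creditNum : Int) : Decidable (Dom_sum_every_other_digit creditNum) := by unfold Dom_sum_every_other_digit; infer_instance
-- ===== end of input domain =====

-- B replaces A's toggle-flag loop with inner digit-sum helper by a two-pass pipeline
-- (extract digit list, then one enumerate pass with a closed-form doubled-digit value): simpler decomposition.


-- ===== PORT A =====
-- while (digitMultiplied != 0): sumOfDigits += digitMultiplied % 10; digitMultiplied = int(digitMultiplied / 10)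
-- int(x/10) is float division then truncation: exact as truncdiv for |x| < 2^53, which holds on Dom.
def masLoop (sumOfDigits digitMultiplied : Int) : Int :=
  if digitMultiplied ≠ 0 then
    masLoop (sumOfDigits + PySem.Int.mod digitMultiplied 10) (PySem.Int.truncdiv digitMultiplied 10)
  else sumOfDigits
termination_by digitMultiplied.natAbs
decreasing_by
  simp only [PySem.Int.truncdiv, Int.natAbs_tdiv]
  exact Nat.div_lt_self (by omega) (by decide)

def multiply_and_sum (creditNum : Int) : Int :=
  masLoop 0 (2 * PySem.Int.mod creditNum 10)

-- while creditNum > 0: if useCurrentDigit: sum += multiply_and_sum(creditNum); toggle; creditNum = int(creditNum / 10)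
def aLoop (useCurrentDigit : Bool) (sum creditNum : Int) : Int :=
  if creditNum > 0 then
    aLoop (!useCurrentDigit)
      (if useCurrentDigit then sum + multiply_and_sum creditNum else sum)
      (PySem.Int.truncdiv creditNum 10)
  else sum
termination_by creditNum.toNat
decreasing_by
  rw [PySem.Int.truncdiv, Int.tdiv_eq_ediv_of_nonneg (by omega)]
  omega

def sum_every_other_digit (creditNum : Int) : Int := aLoop false 0 creditNum

-- ===== PORT B =====
-- Pass 1: digits = []; while creditNum > 0: digits.append(creditNum % 10); creditNum //= 10
def digitsLoop (creditNum : Int) (digits : List Int) : List Int :=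
  if creditNum > 0 then
    digitsLoop (PySem.Int.floordiv creditNum 10) (digits ++ [PySem.Int.mod creditNum 10])
  else digits
termination_by creditNum.toNat
decreasing_by
  rw [PySem.Int.floordiv_eq_ediv_of_pos (by omega)]
  omega

-- Pass 2: for i, d in enumerate(digits): if i % 2 == 1: total += 2*d if 2*d < 10 else 2*d - 9
def sum_every_other_digit_alt (creditNum : Int) : Int :=
  (PySem.List.enumerate (digitsLoop creditNum []) 0).foldl
    (fun total p =>
      if PySem.Int.mod p.1 2 == 1 then
        total + (if 2 * p.2 < 10 then 2 * p.2 else 2 * p.2 - 9)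
      else total) 0

-- ===== PRECONDITION & SPEC =====
def Spec_sum_every_other_digit (creditNum : Int) (out : Int) : Prop := out = sum_every_other_digit_alt creditNum
instance (creditNum : Int) (out : Int) : Decidable (Spec_sum_every_other_digit creditNum out) := by unfold Spec_sum_every_other_digit; infer_instance

-- ===== CLAIM (what is proved, stated in full; the proofs are below) =====
def Claim_equal_sum_every_other_digit : Prop := ∀ (creditNum : Int), Dom_sum_every_other_digit creditNum → Spec_sum_every_other_digit creditNum (sum_every_other_digit creditNum)

-- ===== LEMMAS AND PROOFS =====

-- closed-form doubled-digit value
def cf (d : Int) : Int := if 2 * d < 10 then 2 * d else 2 * d - 9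

-- the digit list of n, least-significant first
def digitsList (n : Int) : List Int :=
  if n > 0 then PySem.Int.mod n 10 :: digitsList (PySem.Int.floordiv n 10) else []
termination_by n.toNat
decreasing_by
  rw [PySem.Int.floordiv_eq_ediv_of_pos (by omega)]
  omega

-- alternating sum of closed-form values over a digit list
def altL : Bool → List Int → Int
  | _, [] => 0
  | u, d :: t => (if u then cf d else 0) + altL (!u) t

theorem mas_closed (n : Int) : multiply_and_sum n = cf (PySem.Int.mod n 10) := by
  have h0 : 0 ≤ PySem.Int.mod n 10 := PySem.Int.mod_nonneg n (by omega)
  have h10 : PySem.Int.mod n 10 < 10 := PySem.Int.mod_lt n (by omega)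
  unfold multiply_and_sum
  interval_cases (PySem.Int.mod n 10) <;>
    simp [masLoop.eq_def, cf, PySem.Int.mod, PySem.Int.truncdiv]

theorem digitsLoop_eq (n : Int) (acc : List Int) : digitsLoop n acc = acc ++ digitsList n := by
  rw [digitsLoop.eq_def, digitsList.eq_def]
  split
  · rw [digitsLoop_eq]
    simp
  · simp
termination_by n.toNat
decreasing_by
  rw [PySem.Int.floordiv_eq_ediv_of_pos (by omega)]
  omega

theorem aLoop_eq (n : Int) (u : Bool) (s : Int) : aLoop u s n = s + altL u (digitsList n) := by
  rw [aLoop.eq_def, digitsList.eq_def]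
  split
  · next h =>
    have htf : PySem.Int.truncdiv n 10 = PySem.Int.floordiv n 10 := by
      rw [PySem.Int.floordiv_eq_ediv_of_pos (by omega : (0:Int) < 10)]
      simp only [PySem.Int.truncdiv]
      rw [Int.tdiv_eq_ediv_of_nonneg (by omega)]
    rw [htf, aLoop_eq, mas_closed, altL]
    cases u <;> simp <;> ring
  · simp [altL]
termination_by n.toNat
decreasing_by
  rw [PySem.Int.floordiv_eq_ediv_of_pos (by omega)]
  omega

theorem bFold_eq (L : List Int) : ∀ (k : Nat) (t : Int),
    (PySem.List.enumerate L (k : Int)).foldl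
      (fun total p =>
        if PySem.Int.mod p.1 2 == 1 then
          total + (if 2 * p.2 < 10 then 2 * p.2 else 2 * p.2 - 9)
        else total) t
      = t + altL (k % 2 == 1) L := by
  induction L with
  | nil => intro k t; simp [PySem.List.enumerate_nil, altL]
  | cons d tl ih =>
    intro k t
    rw [PySem.List.enumerate_cons, List.foldl_cons]
    have hk : ((k : Int) + 1) = ((k + 1 : Nat) : Int) := by push_cast; ring
    rw [hk, ih (k + 1)]
    rw [altL]
    by_cases h1 : k % 2 = 1
    · have h2 : (k + 1) % 2 = 0 := by omega
      have hik : (k : Int) % 2 = 1 := by omega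
      simp [h1, h2, hik, cf]
      ring
    · have h0 : k % 2 = 0 := by omega
      have h2 : (k + 1) % 2 = 1 := by omega
      have hik : (k : Int) % 2 = 0 := by omega
      simp [h0, h2, hik]

-- ===== VERDICT (by name: the statement is the Claim_ definition above) =====
theorem sum_every_other_digit_spec : Claim_equal_sum_every_other_digit := by
  intro n _
  unfold Spec_sum_every_other_digit sum_every_other_digit sum_every_other_digit_alt
  rw [digitsLoop_eq, aLoop_eq]
  have h0 : ((0 : Nat) : Int) = (0 : Int) := rfl
  rw [← h0, bFold_eq]
  simp
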